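-- pv_equiv track=rewrite | github.com/RonySoliman/CodeForces | CodeForces/Z. Three Numbers in python - Codeforces.py | count_valid_combinations
-- ===== SOURCE A (Python) =====
-- def count_valid_combinations(K, S):
--     count = 0
--     for X in range(K + 1):
--         for Y in range(K + 1):
--             Z = S - X - Y
--             if 0 <= Z <= K:
--                 count += 1
--     return count
-- ===== SOURCE B (Python) =====
-- def count_valid_combinations(K, S):
--     # For each X, count Y in [0, K] with 0 <= S - X - Y <= K directly:
--     # Y must lie in [max(0, S - X - K), min(K, S - X)].
--     count = 0
--     for X in range(K + 1):
--         lo = max(0, S - X - K)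
--         hi = min(K, S - X)
--         if lo <= hi:
--             count += hi - lo + 1
--     return count
-- ===== Notes on version B (the rewrite author's own statement) =====
-- stated objective: faster
-- what changed: The inner loop over Y is replaced by an O(1) interval-length computation per X (valid Y form a contiguous interval), turning O(K^2) into O(K).
import Mathlib
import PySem

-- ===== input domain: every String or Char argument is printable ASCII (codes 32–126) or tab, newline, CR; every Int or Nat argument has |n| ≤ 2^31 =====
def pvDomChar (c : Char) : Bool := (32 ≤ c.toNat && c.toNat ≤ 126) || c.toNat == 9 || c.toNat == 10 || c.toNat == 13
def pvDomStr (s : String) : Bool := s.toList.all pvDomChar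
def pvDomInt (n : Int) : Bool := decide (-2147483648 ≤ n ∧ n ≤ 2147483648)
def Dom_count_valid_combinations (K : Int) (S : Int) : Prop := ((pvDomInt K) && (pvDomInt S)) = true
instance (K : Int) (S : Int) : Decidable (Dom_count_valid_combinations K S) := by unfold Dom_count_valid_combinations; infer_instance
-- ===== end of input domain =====

-- B replaces A's inner loop over Y by an O(1) interval-length computation per X (O(K) vs O(K^2)).


-- ===== PORT A =====
def count_valid_combinations (K : Int) (S : Int) : Int :=
  (PySem.List.pyRange 0 (K + 1) 1).foldl
    (fun count X =>
      (PySem.List.pyRange 0 (K + 1) 1).foldl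
        (fun count Y =>
          let Z := S - X - Y
          if 0 ≤ Z ∧ Z ≤ K then count + 1 else count)
        count)
    0

-- ===== PORT B =====
def count_valid_combinations_alt (K : Int) (S : Int) : Int :=
  (PySem.List.pyRange 0 (K + 1) 1).foldl
    (fun count X =>
      let lo := max 0 (S - X - K)
      let hi := min K (S - X)
      if lo ≤ hi then count + (hi - lo + 1) else count)
    0

-- ===== PRECONDITION & SPEC =====
def Spec_count_valid_combinations (K : Int) (S : Int) (out : Int) : Prop := out = count_valid_combinations_alt K S
instance (K : Int) (S : Int) (out : Int) : Decidable (Spec_count_valid_combinations K S out) := by unfold Spec_count_valid_combinations; infer_instance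

-- ===== CLAIM (what is proved, stated in full; the proofs are below) =====
def Claim_equal_count_valid_combinations : Prop := ∀ (K : Int) (S : Int), Dom_count_valid_combinations K S → Spec_count_valid_combinations K S (count_valid_combinations K S)

-- ===== LEMMAS AND PROOFS =====

-- A's inner loop over range(n) counts the Y with 0 ≤ S - X - Y ≤ K: a contiguous interval.
lemma inner_count (X S K : Int) : ∀ (n : Nat) (c : Int),
    (PySem.List.pyRange 0 (n : Int) 1).foldl
      (fun count Y =>
        let Z := S - X - Y
        if 0 ≤ Z ∧ Z ≤ K then count + 1 else count) c
    = c + (if max 0 (S - X - K) ≤ min (S - X) ((n : Int) - 1)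
           then min (S - X) ((n : Int) - 1) - max 0 (S - X - K) + 1 else 0)
  | 0, c => by
    simp only [Nat.cast_zero, PySem.List.pyRange_one_eq_nil (by omega : (0:Int) ≤ 0),
      List.foldl_nil]
    have h : ¬ max 0 (S - X - K) ≤ min (S - X) ((0 : Int) - 1) := by omega
    rw [if_neg h]; ring
  | n + 1, c => by
    have hc : ((n + 1 : Nat) : Int) = (n : Int) + 1 := by push_cast; ring
    rw [hc, PySem.List.pyRange_one_succ_right (by positivity), List.foldl_append,
      inner_count X S K n c]
    simp only [List.foldl_cons, List.foldl_nil]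
    split_ifs <;> omega

theorem count_valid_combinations_equal (K S : Int) :
    count_valid_combinations K S = count_valid_combinations_alt K S := by
  unfold count_valid_combinations count_valid_combinations_alt
  by_cases hK : 0 ≤ K
  · have hn : ((K + 1).toNat : Int) = K + 1 := by omega
    apply PySem.List.foldl_congr_mem
    intro c X _
    rw [← hn, inner_count X S K (K + 1).toNat c]
    simp only []
    split_ifs <;> omega
  · rw [PySem.List.pyRange_one_eq_nil (by omega : K + 1 ≤ 0)]; rfl

-- ===== VERDICT (by name: the statement is the Claim_ definition above) =====
theorem count_valid_combinations_spec : Claim_equal_count_valid_combinations := by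
  intro K S _
  exact count_valid_combinations_equal K S
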